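-- pv_equiv track=rewrite | github.com/fabiogvdneto/ist-fp-2020 | main.py | __obter_checksum
-- ===== SOURCE A (Python) =====
-- def __obter_checksum(cifra):
--     letras = {}
--
--     for caractere in cifra:
--         if caractere.isalpha():
--             letras[caractere] = letras.get(caractere, 0) + 1
--
--     if len(letras) < 5:
--         return None
--
--     # Sendo e[0] um caractere e e[1] o número de ocorrências do mesmo na cifra:
--     # 10 - e[1] é usado pois nós queremos ordenar do maior numero para o menor.
--     # Este numero é transformado em uma string para que possa ser concatenado.
--     # e[0] é adicionado para que, caso haja um empate, a ordenação possa ocorrer de forma alfabética.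
--     letras = sorted(letras.items(), key=lambda e: (-e[1], e[0]))
--
--     del letras[5:]  # Apenas as primeiras 5 letras são importantes.
--
--     letras = [e[0] for e in letras]
--     letras = ''.join(letras)
--
--     return '[' + letras + ']'
-- ===== SOURCE B (Python) =====
-- def __obter_checksum(cifra):
--     contagens = {}
--
--     for caractere in cifra:
--         if caractere.isalpha():
--             contagens[caractere] = contagens.get(caractere, 0) + 1
--
--     if len(contagens) < 5:
--         return None
--
--     # Bucket the letters by occurrence count, then walk the counts from the
--     # highest down, taking each bucket's letters in alphabetical order until
--     # five letters have been collected.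
--     baldes = {}
--     for letra, n in contagens.items():
--         baldes.setdefault(n, []).append(letra)
--
--     resultado = []
--     for n in sorted(baldes, reverse=True):
--         resultado.extend(sorted(baldes[n]))
--         if len(resultado) >= 5:
--             break
--
--     return '[' + ''.join(resultado[:5]) + ']'
-- ===== Notes on version B (the rewrite author's own statement) =====
-- stated objective: alternative
-- what changed: Replaces A's single lexicographic sort of all (letter, count) pairs followed by truncation with a bucket walk: letters are grouped into buckets keyed by occurrence count, the distinct counts are visited from highest to lowest with each bucket's letters sorted alphabetically, and collection stops early once five letters are gathered.
import Mathlib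
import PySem

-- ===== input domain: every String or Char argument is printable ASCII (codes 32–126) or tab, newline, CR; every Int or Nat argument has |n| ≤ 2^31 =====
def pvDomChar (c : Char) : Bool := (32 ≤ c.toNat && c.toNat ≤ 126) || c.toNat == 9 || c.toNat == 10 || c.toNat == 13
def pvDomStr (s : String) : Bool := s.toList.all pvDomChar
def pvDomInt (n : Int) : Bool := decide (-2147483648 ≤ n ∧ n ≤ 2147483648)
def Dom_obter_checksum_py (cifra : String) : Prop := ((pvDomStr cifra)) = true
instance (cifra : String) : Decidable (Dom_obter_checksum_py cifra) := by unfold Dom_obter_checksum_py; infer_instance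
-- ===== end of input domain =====

-- B replaces A's single lexicographic sort of all (letter, count) pairs by a bucket walk:
-- letters are grouped by occurrence count, counts are visited from highest to lowest
-- (each bucket alphabetically sorted), stopping once five letters are collected; alternative decomposition, same result.

-- ===== PORT A =====
def obter_checksum_py (cifra : String) : Option String :=
  let letras := cifra.toList.foldl
    (fun d c => if PySem.Chars.isalpha c then d.insert c (d.getD c 0 + 1) else d)
    PySem.Dict.empty
  if letras.size < 5 then none
  else
    let ordenadas := PySem.List.sorted2 letras.items (fun e => -e.2) (fun e => e.1) false
    let top5 := ordenadas.take 5          -- del letras[5:]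
    some ("[" ++ String.ofList (top5.map (·.1)) ++ "]")

-- ===== PORT B =====
-- the 'for n in sorted(baldes, reverse=True): … if len(resultado) >= 5: break' loop
def pvBucketWalk : List Int → PySem.Dict Int (List Char) → List Char → List Char
  | [], _, acc => acc
  | n :: rest, b, acc =>
    let acc' := acc ++ PySem.List.sorted (b.getD n []) (fun c => c) false
    if 5 ≤ acc'.length then acc' else pvBucketWalk rest b acc'

def obter_checksum_py_alt (cifra : String) : Option String :=
  let contagens := cifra.toList.foldl
    (fun d c => if PySem.Chars.isalpha c then d.insert c (d.getD c 0 + 1) else d)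
    PySem.Dict.empty
  if contagens.size < 5 then none
  else
    let baldes := contagens.items.foldl
      (fun b p => b.modify p.2 [] (fun l => l ++ [p.1])) PySem.Dict.empty
    let resultado := pvBucketWalk (PySem.List.sorted baldes.keys (fun n => n) true) baldes []
    some ("[" ++ String.ofList (resultado.take 5) ++ "]")

-- ===== PRECONDITION & SPEC =====
def Spec_obter_checksum_py (cifra : String) (out : Option String) : Prop := out = obter_checksum_py_alt cifra
instance (cifra : String) (out : Option String) : Decidable (Spec_obter_checksum_py cifra out) := by unfold Spec_obter_checksum_py; infer_instance

-- ===== CLAIM (what is proved, stated in full; the proofs are below) =====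
def Claim_equal_obter_checksum_py : Prop := ∀ (cifra : String), Dom_obter_checksum_py cifra → Spec_obter_checksum_py cifra (obter_checksum_py cifra)

-- ===== LEMMAS AND PROOFS =====

-- Python's tuple key (k1 x, k2 x) is the lexicographic order on pairs.
theorem pv_sorted2_eq_sorted_toLex {α κ₁ κ₂ : Type} [LinearOrder κ₁] [LinearOrder κ₂]
    (xs : List α) (k1 : α → κ₁) (k2 : α → κ₂) :
    PySem.List.sorted2 xs k1 k2 false
      = PySem.List.sorted xs (fun a => toLex (k1 a, k2 a)) false := by
  unfold PySem.List.sorted2 PySem.List.sorted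
  simp only [if_neg (by simp : ¬ (false = true))]
  have h : (fun a b => decide (k1 a < k1 b) || (!decide (k1 b < k1 a) && decide (k2 a < k2 b)))
      = (fun a b => decide (toLex (k1 a, k2 a) < toLex (k1 b, k2 b))) := by
    funext a b
    rcases lt_trichotomy (k1 a) (k1 b) with h1 | h1 | h1
    · simp [Prod.Lex.toLex_lt_toLex, h1]
    · simp [Prod.Lex.toLex_lt_toLex, h1]
    · simp [Prod.Lex.toLex_lt_toLex, h1, h1.asymm, h1.ne']
  rw [h]

-- partition: flat-mapping the filters over a duplicate-free list of all occurring
-- values is a permutation of the original list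
theorem pv_flatMap_filter_perm {α : Type} (f : α → Int) :
    ∀ (K : List Int) (S : List α), K.Nodup → (∀ x ∈ S, f x ∈ K) →
      (K.flatMap (fun n => S.filter (fun x => f x == n))).Perm S := by
  intro K
  induction K with
  | nil =>
    intro S _ hmem
    have : S = [] := List.eq_nil_iff_forall_not_mem.mpr (fun x hx => by simpa using hmem x hx)
    simp [this]
  | cons n K' ih =>
    intro S hnd hmem
    have hnotmem : n ∉ K' := (List.nodup_cons.mp hnd).1
    have hnd' : K'.Nodup := (List.nodup_cons.mp hnd).2
    rw [List.flatMap_cons]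
    have hflat : K'.flatMap (fun m => S.filter (fun x => f x == m))
        = K'.flatMap (fun m => (S.filter (fun x => !(f x == n))).filter (fun x => f x == m)) := by
      unfold List.flatMap
      congr 1
      apply List.map_congr_left
      intro m hm
      rw [List.filter_filter]
      apply List.filter_congr
      intro x _
      by_cases hfx : f x = m
      · have hne : f x ≠ n := fun h => hnotmem (h ▸ hfx ▸ hm)
        have hmn : ¬ m = n := fun h => hne (hfx.trans h)
        simp [hfx, hmn]
      · simp [hfx]
    have hsub : ∀ x ∈ S.filter (fun x => !(f x == n)), f x ∈ K' := by
      intro x hx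
      rcases List.mem_filter.mp hx with ⟨hxS, hxne⟩
      have := hmem x hxS
      simp only [List.mem_cons] at this
      rcases this with h | h
      · simp [h] at hxne
      · exact h
    refine List.Perm.trans ?_ (List.filter_append_perm (fun x => f x == n) S)
    apply List.Perm.append_left
    rw [hflat]
    exact ih _ hnd' hsub

-- the break in B's walk only cuts letters past position five
theorem pv_bucketWalk_take (b : PySem.Dict Int (List Char)) :
    ∀ (cs : List Int) (acc : List Char),
      (pvBucketWalk cs b acc).take 5
        = (acc ++ cs.flatMap (fun n => PySem.List.sorted (b.getD n []) (fun c => c) false)).take 5 := by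
  intro cs
  induction cs with
  | nil => intro acc; simp [pvBucketWalk]
  | cons n rest ih =>
    intro acc
    show (if 5 ≤ (acc ++ PySem.List.sorted (b.getD n []) (fun c => c) false).length then _ else
        pvBucketWalk rest b _).take 5 = _
    split_ifs with h
    · rw [List.flatMap_cons, ← List.append_assoc, List.take_append_of_le_length h]
    · rw [ih, List.flatMap_cons, List.append_assoc]

-- the heart: the lexicographic sort of (letter, count) pairs with distinct letters IS the
-- bucket walk — counts descending, letters ascending within a count
theorem pv_central (items : List (Char × Int)) (hnd : (items.map (·.1)).Nodup) :
    PySem.List.sorted2 items (fun e => -e.2) (fun e => e.1) false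
      = (PySem.List.sorted (PySem.Set.ofList (items.map (·.2))) (fun n => n) true).flatMap
          (fun n => (PySem.List.sorted ((items.filter (fun p => p.2 == n)).map (·.1)) (fun c => c) false).map
            (fun c => (c, n))) := by
  rw [pv_sorted2_eq_sorted_toLex]
  set K : List Int := PySem.Set.ofList (items.map (·.2)) with hK
  set counts := PySem.List.sorted K (fun n => n) true with hcounts
  have hKnd : K.Nodup := PySem.Set.nodup_ofList _
  have hcountsK : counts.Perm K := PySem.List.sorted_perm _ _ _
  have hbucket_nd : ∀ n : Int, ((items.filter (fun p => p.2 == n)).map (·.1)).Nodup := by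
    intro n
    exact (List.Sublist.map (fun p : Char × Int => p.1) (List.filter_sublist (l := items) (p := fun p : Char × Int => p.2 == n))).nodup hnd
  apply PySem.List.sorted_eq_of_perm_of_pairwise_lt
  · -- permutation
    have hinner : ∀ n : Int,
        ((PySem.List.sorted ((items.filter (fun p => p.2 == n)).map (·.1)) (fun c => c) false).map
            (fun c => (c, n))).Perm (items.filter (fun p => p.2 == n)) := by
      intro n
      refine ((PySem.List.sorted_perm _ _ _).map _).trans ?_
      rw [List.map_map]
      have : ∀ p ∈ items.filter (fun p => p.2 == n), ((fun c => (c, n)) ∘ (·.1)) p = p := by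
        intro p hp
        have : p.2 = n := by simpa using (List.mem_filter.mp hp).2
        simp [← this]
      rw [List.map_congr_left this]
      simp
    refine List.Perm.trans (List.Perm.flatMap_left _ (fun n _ => hinner n)) ?_
    refine List.Perm.trans (hcountsK.flatMap_right _) ?_
    exact pv_flatMap_filter_perm (·.2) K items hKnd
      (fun p hp => by rw [hK]; exact (PySem.Set.mem_ofList _ _).mpr (List.mem_map_of_mem hp))
  · -- strict pairwise ordering under the lexicographic key
    rw [List.flatMap_def, List.pairwise_flatten]
    constructor
    · intro l hl
      rcases List.mem_map.mp hl with ⟨n, _, rfl⟩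
      rw [List.pairwise_map]
      have hle := PySem.List.sorted_pairwise ((items.filter (fun p => p.2 == n)).map (·.1)) (fun c => c)
      have hne : (PySem.List.sorted ((items.filter (fun p => p.2 == n)).map (·.1)) (fun c => c) false).Nodup :=
        (PySem.List.sorted_perm _ _ _).symm.nodup (hbucket_nd n)
      refine (hle.and hne).imp ?_
      intro a c ⟨h1, h2⟩
      exact Prod.Lex.toLex_lt_toLex.mpr (Or.inr ⟨rfl, lt_of_le_of_ne h1 h2⟩)
    · have hgt : counts.Pairwise (fun n m => m < n) := by
        have hle := PySem.List.sorted_pairwise_rev K (fun n => n)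
        have hndc : counts.Nodup := hcountsK.symm.nodup hKnd
        rw [← hcounts] at hle
        exact (hle.and hndc).imp (fun ⟨h1, h2⟩ => lt_of_le_of_ne h1 (Ne.symm h2))
      refine (List.pairwise_map.mpr (hgt.imp ?_))
      intro n m h x hx y hy
      rcases List.mem_map.mp hx with ⟨cx, _, rfl⟩
      rcases List.mem_map.mp hy with ⟨cy, _, rfl⟩
      exact Prod.Lex.toLex_lt_toLex.mpr (Or.inl (by simpa using neg_lt_neg h))

-- ===== VERDICT (by name: the statement is the Claim_ definition above) =====
theorem obter_checksum_py_spec : Claim_equal_obter_checksum_py := by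
  intro cifra _
  unfold Spec_obter_checksum_py obter_checksum_py obter_checksum_py_alt
  set L := cifra.toList.filter PySem.Chars.isalpha with hL
  have hdict : cifra.toList.foldl
      (fun d c => if PySem.Chars.isalpha c then d.insert c (d.getD c 0 + 1) else d)
      PySem.Dict.empty = PySem.Dict.counter L := by
    rw [PySem.List.foldl_if_eq_foldl_filter, ← hL,
      PySem.Dict.foldl_insert_getD_add_one_eq_counter]
  rw [hdict]
  dsimp only
  split_ifs with hsize
  · rfl
  · -- the interesting branch
    set items := (PySem.Dict.counter L).items with hitems
    refine congrArg (fun l : List Char => some ("[" ++ String.ofList l ++ "]")) ?_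
    -- baldes lookups and keys
    have hbaldes_getD : ∀ n : Int,
        (items.foldl (fun b p => b.modify p.2 [] (fun l => l ++ [p.1])) PySem.Dict.empty).getD n []
          = (items.filter (fun p => p.2 == n)).map (·.1) := by
      intro n
      rw [show (fun (b : PySem.Dict Int (List Char)) (p : Char × Int) =>
            b.modify p.2 [] (fun l => l ++ [p.1]))
          = (fun b p => (fun (b : PySem.Dict Int (List Char)) (q : Int × Char) =>
              b.modify q.1 [] (fun l => l ++ [q.2])) b ((fun p : Char × Int => (p.2, p.1)) p)) from rfl,
        ← List.foldl_map (f := fun p : Char × Int => (p.2, p.1))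
          (g := fun (b : PySem.Dict Int (List Char)) (q : Int × Char) =>
            b.modify q.1 [] (fun l => l ++ [q.2])),
        PySem.Dict.getD_foldl_modify_append]
      simp [List.filter_map, List.map_map, Function.comp_def]
    have hbaldes_keys :
        (items.foldl (fun b p => b.modify p.2 [] (fun l => l ++ [p.1])) PySem.Dict.empty).keys
          = PySem.Set.ofList (items.map (·.2)) := by
      rw [PySem.Dict.keys_foldl_modify_key items (fun p : Char × Int => p.2) []
        (fun (_ : PySem.Dict Int (List Char)) (p : Char × Int) => (fun l => l ++ [p.1]))
        PySem.Dict.empty]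
      simp [PySem.Dict.keys_empty, PySem.Set.update_nil_left]
    have hnd : (items.map (·.1)).Nodup := by
      rw [hitems]
      exact PySem.Dict.nodup_keys_counter L
    rw [pv_bucketWalk_take]
    simp only [List.nil_append]
    rw [hbaldes_keys]
    conv_lhs => rw [pv_central items hnd]
    rw [List.map_take, List.map_flatMap]
    congr 1
    apply List.flatMap_congr
    intro n _
    rw [hbaldes_getD n, List.map_map]
    simp [Function.comp_def]
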